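-- pv_equiv track=rewrite | github.com/Kinrokin/KT | KT_PROD_CLEANROOM/tools/operator/cohort0_gate_d_successor_execution_charter_tranche.py | _require_same_subject_head
-- ===== SOURCE A (Python) =====
-- from typing import Any, Dict, List, Optional, Sequence
--
-- def _require_same_subject_head(packets: Sequence[Dict[str, Any]]) -> str:
--     heads = {
--         str(packet.get("subject_head", "")).strip()
--         for packet in packets
--         if isinstance(packet, dict) and str(packet.get("subject_head", "")).strip()
--     }
--     if len(heads) != 1:
--         raise RuntimeError("FAIL_CLOSED: successor execution charter requires one same-head authority line")
--     return next(iter(heads))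
-- ===== SOURCE B (Python) =====
-- def _require_same_subject_head(packets):
--     head = None
--     for packet in packets:
--         if isinstance(packet, dict):
--             h = str(packet.get("subject_head", "")).strip()
--             if h:
--                 if head is None:
--                     head = h
--                 elif h != head:
--                     raise RuntimeError("FAIL_CLOSED: successor execution charter requires one same-head authority line")
--     if head is None:
--         raise RuntimeError("FAIL_CLOSED: successor execution charter requires one same-head authority line")
--     return head
-- ===== Notes on version B (the rewrite author's own statement) =====
-- stated objective: simpler
-- what changed: Replaces the set comprehension plus post-hoc cardinality check with a single pass keeping one scalar head, raising immediately on the first conflicting head.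
import Mathlib
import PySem

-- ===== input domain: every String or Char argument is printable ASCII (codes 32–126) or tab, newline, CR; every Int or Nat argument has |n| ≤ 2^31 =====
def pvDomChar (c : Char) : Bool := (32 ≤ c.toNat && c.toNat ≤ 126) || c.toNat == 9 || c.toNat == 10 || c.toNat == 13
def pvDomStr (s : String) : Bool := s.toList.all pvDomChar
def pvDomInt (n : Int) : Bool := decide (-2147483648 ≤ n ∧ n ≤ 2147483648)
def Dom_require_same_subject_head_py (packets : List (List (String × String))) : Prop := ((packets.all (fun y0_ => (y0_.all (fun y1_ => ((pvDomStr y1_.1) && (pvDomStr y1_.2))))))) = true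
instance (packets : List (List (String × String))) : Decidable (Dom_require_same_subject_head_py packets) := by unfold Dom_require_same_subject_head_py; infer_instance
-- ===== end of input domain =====

-- B replaces the set comprehension + cardinality check with a single pass over the packets
-- keeping one scalar head and failing immediately on the first conflict (simpler).

-- shared helper: str(packet.get("subject_head", "")).strip()
def pvHeadOf (p : List (String × String)) : String :=
  PySem.Str.strip ((PySem.Dict.mk p).getD "subject_head" "")

-- ===== PORT A =====
-- raise is modelled by returning "" (those inputs are excluded by Pre_).
def require_same_subject_head_py (packets : List (List (String × String))) : String :=
  let heads : PySem.Set String :=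
    PySem.Set.ofList ((packets.filter (fun p => pvHeadOf p ≠ "")).map pvHeadOf)
  if heads.length ≠ 1 then ""          -- raise RuntimeError(...)
  else heads.headI                     -- next(iter(heads)) : singleton, so order-independent

-- ===== PORT B =====
-- the loop: head is `none` until the first non-empty stripped subject_head is seen;
-- a later different head raises at once (modelled by returning `none`).
def pvAltGo (head : Option String) : List (List (String × String)) → Option String
  | [] => head
  | p :: rest =>
      let h := pvHeadOf p
      if h = "" then pvAltGo head rest
      else
        match head with
        | none => pvAltGo (some h) rest
        | some h0 => if h ≠ h0 then none else pvAltGo head rest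

def require_same_subject_head_py_alt (packets : List (List (String × String))) : String :=
  (pvAltGo none packets).getD ""       -- none = the RuntimeError (excluded by Pre_)

-- ===== PRECONDITION & SPEC =====
-- Pre_ admits exactly the inputs on which the Python A returns: at least one packet has a
-- non-empty stripped subject_head, and all such heads agree (otherwise A raises RuntimeError).
def Pre_require_same_subject_head_py (packets : List (List (String × String))) : Prop :=
  let hs := (packets.map pvHeadOf).filter (fun s => s ≠ "")
  hs ≠ [] ∧ ∀ x ∈ hs, x = hs.headI
instance (packets : List (List (String × String))) : Decidable (Pre_require_same_subject_head_py packets) := by unfold Pre_require_same_subject_head_py; infer_instance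

def pvWitness_require_same_subject_head_py : (List (List (String × String))) :=
  [[("subject_head", " alice ")], [("subject_head", "alice")], [("other", "b")]]

def Spec_require_same_subject_head_py (packets : List (List (String × String))) (out : String) : Prop := out = require_same_subject_head_py_alt packets
instance (packets : List (List (String × String))) (out : String) : Decidable (Spec_require_same_subject_head_py packets out) := by unfold Spec_require_same_subject_head_py; infer_instance

-- ===== CLAIM (what is proved, stated in full; the proofs are below) =====
def Claim_equal_require_same_subject_head_py : Prop := ∀ (packets : List (List (String × String))), Dom_require_same_subject_head_py packets → Pre_require_same_subject_head_py packets → Spec_require_same_subject_head_py packets (require_same_subject_head_py packets)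

-- ===== LEMMAS AND PROOFS =====

-- filter-then-map (A's comprehension) = map-then-filter (the head list Pre_ talks about)
theorem pv_hs_eq (packets : List (List (String × String))) :
    (packets.filter (fun p => pvHeadOf p ≠ "")).map pvHeadOf
      = (packets.map pvHeadOf).filter (fun s => s ≠ "") := by
  induction packets with
  | nil => rfl
  | cons p rest ih =>
      simp only [List.map_cons, List.filter_cons]
      by_cases h : pvHeadOf p = ""
      · simp [h]; simpa using ih
      · simp [h]; simpa using ih

-- ofList of a nonempty constant list is the singleton
theorem pv_ofList_const {l : List String} {h : String} (hne : l ≠ []) (hall : ∀ x ∈ l, x = h) :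
    PySem.Set.ofList l = [h] := by
  induction l with
  | nil => exact absurd rfl hne
  | cons a t ih =>
      have ha : a = h := hall a (by simp)
      cases t with
      | nil => simp [PySem.Set.ofList_cons, ha, PySem.Set.discard]
      | cons b t' =>
          have := ih (by simp) (fun x hx => hall x (by simp [hx]))
          rw [PySem.Set.ofList_cons, this, ha]
          simp [PySem.Set.discard]

theorem pv_altGo_some (packets : List (List (String × String))) (h : String)
    (hall : ∀ x ∈ (packets.map pvHeadOf).filter (fun s => s ≠ ""), x = h) :
    pvAltGo (some h) packets = some h := by
  induction packets with
  | nil => rfl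
  | cons p rest ih =>
      by_cases hp : pvHeadOf p = ""
      · have hfc : ((p :: rest).map pvHeadOf).filter (fun s => s ≠ "")
            = (rest.map pvHeadOf).filter (fun s => s ≠ "") := by
          simp [hp]
        rw [hfc] at hall
        simp only [pvAltGo, hp, reduceIte]
        exact ih hall
      · have hfc : ((p :: rest).map pvHeadOf).filter (fun s => s ≠ "")
            = pvHeadOf p :: (rest.map pvHeadOf).filter (fun s => s ≠ "") := by
          simp [hp]
        rw [hfc] at hall
        have hph : pvHeadOf p = h := hall _ (by simp)
        have hne' : h ≠ "" := hph ▸ hp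
        simp only [pvAltGo]
        rw [hph]
        simp [hne']
        exact ih (fun x hx => hall x (List.mem_cons_of_mem _ hx))

theorem pv_altGo_none (packets : List (List (String × String)))
    (hne : (packets.map pvHeadOf).filter (fun s => s ≠ "") ≠ [])
    (hall : ∀ x ∈ (packets.map pvHeadOf).filter (fun s => s ≠ ""), x = ((packets.map pvHeadOf).filter (fun s => s ≠ "")).headI) :
    pvAltGo none packets = some (((packets.map pvHeadOf).filter (fun s => s ≠ "")).headI) := by
  induction packets with
  | nil => exact absurd rfl hne
  | cons p rest ih =>
      by_cases hp : pvHeadOf p = ""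
      · have hfc : ((p :: rest).map pvHeadOf).filter (fun s => s ≠ "")
            = (rest.map pvHeadOf).filter (fun s => s ≠ "") := by
          simp [hp]
        rw [hfc] at hne hall
        simp only [pvAltGo, hp, reduceIte]
        rw [hfc]
        exact ih hne hall
      · have hfc : ((p :: rest).map pvHeadOf).filter (fun s => s ≠ "")
            = pvHeadOf p :: (rest.map pvHeadOf).filter (fun s => s ≠ "") := by
          simp [hp]
        rw [hfc] at hall ⊢
        simp only [List.headI] at hall ⊢
        simp only [pvAltGo, if_neg hp]
        exact pv_altGo_some rest (pvHeadOf p)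
          (fun x hx => hall x (List.mem_cons_of_mem _ hx))

-- ===== VERDICT (by name: the statement is the Claim_ definition above) =====
theorem require_same_subject_head_py_spec : Claim_equal_require_same_subject_head_py := by
  intro packets _ hpre
  obtain ⟨hne, hall⟩ := hpre
  unfold Spec_require_same_subject_head_py
  unfold require_same_subject_head_py require_same_subject_head_py_alt
  rw [pv_hs_eq, pv_ofList_const hne hall, pv_altGo_none packets hne hall]
  simp
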